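-- pv_equiv track=rewrite | github.com/eternagame/OpenKnotScorePipeline | src/openknotscore/lib/inference-2d.py | mask_diagonal
-- ===== SOURCE A (Python) =====
-- def mask_diagonal(matrix, mask_value=0):
--     matrix=matrix.copy()
--     n = len(matrix)
--     for i in range(n):
--         for j in range(n):
--             if abs(i - j) < 4:
--                 matrix[i][j] = mask_value
--     return matrix
-- ===== SOURCE B (Python) =====
-- def mask_diagonal(matrix, mask_value=0):
--     out = matrix.copy()
--     n = len(out)
--     for i in range(n):
--         lo = max(0, i - 3)
--         hi = min(n, i + 4)
--         row = out[i]
--         out[i] = row[:lo] + [mask_value] * (hi - lo) + row[hi:]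
--     return out
-- ===== Notes on version B (the rewrite author's own statement) =====
-- stated objective: alternative
-- what changed: B rebuilds each row once by splicing a constant band segment [max(0,i-3), min(n,i+4)) instead of scanning all n columns per row with an |i-j|<4 test; intended as asymptotically lighter but measured only ~1.4x at the largest size, so claimed as an alternative.
-- outside the precondition, e.g. on mask_diagonal([[1, 2], [3]], 0): A raises IndexError, B returns [[0, 0], [0, 0]]
import Mathlib
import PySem

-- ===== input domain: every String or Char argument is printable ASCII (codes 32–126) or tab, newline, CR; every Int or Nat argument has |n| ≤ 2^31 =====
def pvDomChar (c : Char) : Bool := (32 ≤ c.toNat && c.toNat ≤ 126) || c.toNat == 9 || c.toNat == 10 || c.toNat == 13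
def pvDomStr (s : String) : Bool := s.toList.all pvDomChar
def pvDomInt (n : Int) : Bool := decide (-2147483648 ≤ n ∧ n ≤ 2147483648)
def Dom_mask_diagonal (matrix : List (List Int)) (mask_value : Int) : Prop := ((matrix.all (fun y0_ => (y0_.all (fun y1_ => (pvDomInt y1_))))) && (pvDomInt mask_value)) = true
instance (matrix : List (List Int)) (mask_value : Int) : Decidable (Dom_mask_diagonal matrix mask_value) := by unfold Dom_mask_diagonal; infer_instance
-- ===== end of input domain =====

-- B replaces A's per-row column scan (test |i-j|<4 on every j) by splicing one constant band
-- segment per row (an alternative decomposition; not measured ≥1.5x faster). Equivalence is about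
-- the RETURN value only: A mutates the row lists of its (shallow-copied) argument in place, B
-- builds fresh rows.

-- ===== PORT A =====
-- literal port of A: shallow copy, then for i in range(n): for j in range(n): if abs(i-j)<4: matrix[i][j] = mask_value
def mask_diagonal (matrix : List (List Int)) (mask_value : Int) : List (List Int) :=
  let n := matrix.length
  (List.range n).foldl (fun (m : List (List Int)) (i : Nat) =>
    (List.range n).foldl (fun (m : List (List Int)) (j : Nat) =>
      if ((i : Int) - (j : Int)).natAbs < 4 then
        m.set i ((m.getD i []).set j mask_value)
      else m) m) matrix

-- ===== PORT B =====
-- literal port of Source B: per row i, out[i] = row[:lo] + [mask_value]*(hi-lo) + row[hi:]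
-- (lo = max(0,i-3) is Nat subtraction i-3; hi = min(n, i+4))
def mask_diagonal_alt (matrix : List (List Int)) (mask_value : Int) : List (List Int) :=
  let n := matrix.length
  (List.range n).foldl (fun (out : List (List Int)) (i : Nat) =>
    let lo := i - 3
    let hi := min n (i + 4)
    let row := out.getD i []
    out.set i (row.take lo ++ List.replicate (hi - lo) mask_value ++ row.drop hi)) matrix

-- ===== PRECONDITION & SPEC =====
-- Pre_ excludes exactly the inputs where the Python A raises IndexError: some row i is shorter
-- than the band end min(i+4, n), so A's write matrix[i][j] = mask_value goes out of range.
def Pre_mask_diagonal (matrix : List (List Int)) (mask_value : Int) : Prop :=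
  ∀ i, i < matrix.length → min (i + 4) matrix.length ≤ (matrix.getD i []).length
instance (matrix : List (List Int)) (mask_value : Int) : Decidable (Pre_mask_diagonal matrix mask_value) := by unfold Pre_mask_diagonal; infer_instance

def pvWitness_mask_diagonal : List (List Int) × Int := ([[1, 2], [3, 4]], 0)

def Spec_mask_diagonal (matrix : List (List Int)) (mask_value : Int) (out : List (List Int)) : Prop := out = mask_diagonal_alt matrix mask_value
instance (matrix : List (List Int)) (mask_value : Int) (out : List (List Int)) : Decidable (Spec_mask_diagonal matrix mask_value out) := by unfold Spec_mask_diagonal; infer_instance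

-- ===== CLAIM (what is proved, stated in full; the proofs are below) =====
def Claim_equal_mask_diagonal : Prop := ∀ (matrix : List (List Int)) (mask_value : Int), Dom_mask_diagonal matrix mask_value → Pre_mask_diagonal matrix mask_value → Spec_mask_diagonal matrix mask_value (mask_diagonal matrix mask_value)
-- ===== LEMMAS AND PROOFS =====

-- indexed map: the common shape both outer folds reduce to
def pvApplyIdx (h : Nat → List Int → List Int) : Nat → List (List Int) → List (List Int)
  | _, [] => []
  | i, r :: rs => h i r :: pvApplyIdx h (i + 1) rs

lemma pvApplyIdx_congr (h1 h2 : Nat → List Int → List Int) :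
    ∀ (rs : List (List Int)) (s : Nat),
      (∀ k, k < rs.length → h1 (s + k) (rs.getD k []) = h2 (s + k) (rs.getD k [])) →
      pvApplyIdx h1 s rs = pvApplyIdx h2 s rs := by
  intro rs
  induction rs with
  | nil => intro s _; rfl
  | cons r rs ih =>
    intro s hEq
    simp only [pvApplyIdx]
    congr 1
    · simpa using hEq 0 (by simp)
    · apply ih
      intro k hk
      have := hEq (k + 1) (by simpa using Nat.succ_lt_succ hk)
      simpa [Nat.add_assoc, Nat.add_comm 1 k, Nat.add_left_comm] using this

-- a fold that rewrites row i from row i, over indices pre.length, pre.length+1, …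
lemma pvOuterFold (h : Nat → List Int → List Int) :
    ∀ (rs pre : List (List Int)),
      (List.range' pre.length rs.length).foldl
          (fun (m : List (List Int)) (i : Nat) => m.set i (h i (m.getD i []))) (pre ++ rs)
        = pre ++ pvApplyIdx h pre.length rs := by
  intro rs
  induction rs with
  | nil => intro pre; simp [pvApplyIdx]
  | cons r rs ih =>
    intro pre
    have hget : (pre ++ r :: rs).getD pre.length [] = r := by
      simp [List.getD, List.getElem?_append_right (Nat.le_refl pre.length)]
    have hset : (pre ++ r :: rs).set pre.length (h pre.length r)
        = (pre ++ [h pre.length r]) ++ rs := by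
      simp
    have ih' := ih (pre ++ [h pre.length r])
    have hlen : (pre ++ [h pre.length r]).length = pre.length + 1 := by simp
    rw [hlen] at ih'
    simp only [List.length_cons]
    rw [List.range'_succ, List.foldl_cons, hget, hset, ih']
    simp [pvApplyIdx]

-- the value of l.set k v at position k, as a map
lemma pvSet_getElem?_self (r : List Int) (k : Nat) (v : Int) :
    (r.set k v)[k]? = r[k]?.map (fun _ => v) := by
  by_cases h : k < r.length
  · simp [List.getElem?_set, h, List.getElem?_eq_getElem h]
  · simp [List.getElem?_set, h, List.getElem?_eq_none (Nat.le_of_not_lt h)]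

-- pull the repeated set-at-i out of A's inner column loop
lemma pvInnerShift (i : Nat) (c : Nat → Prop) [DecidablePred c] (v : Int) :
    ∀ (js : List Nat) (m : List (List Int)),
      js.foldl (fun (m : List (List Int)) (j : Nat) =>
          if c j then m.set i ((m.getD i []).set j v) else m) m
        = m.set i (js.foldl (fun (r : List Int) (j : Nat) =>
            if c j then r.set j v else r) (m.getD i [])) := by
  intro js
  induction js with
  | nil =>
    intro m
    by_cases hi : i < m.length
    · simp [List.getD, List.getElem?_eq_getElem hi, List.set_getElem_self]
    · simp [List.set_eq_of_length_le (Nat.le_of_not_lt hi)]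
  | cons j js ih =>
    intro m
    rw [List.foldl_cons, ih, List.foldl_cons]
    by_cases hc : c j
    · simp only [hc, if_true]
      by_cases hi : i < m.length
      · have hget : ((m.set i ((m.getD i []).set j v)).getD i []) = (m.getD i []).set j v := by
          simp [List.getD, List.getElem?_set_self (by simpa using hi)]
        rw [hget, List.set_set]
      · have hle := Nat.le_of_not_lt hi
        simp [List.set_eq_of_length_le hle, List.getD,
          List.getElem?_eq_none (l := m) hle]
    · simp [hc]

-- entries of a conditional constant-set fold
lemma pvFoldSet_getElem? (c : Nat → Prop) [DecidablePred c] (v : Int) :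
    ∀ (js : List Nat) (r : List Int) (k : Nat),
      (js.foldl (fun (r : List Int) (j : Nat) => if c j then r.set j v else r) r)[k]?
        = if k ∈ js ∧ c k then r[k]?.map (fun _ => v) else r[k]? := by
  intro js
  induction js with
  | nil => intro r k; simp
  | cons j js ih =>
    intro r k
    by_cases hc : c j
    · rw [List.foldl_cons, if_pos hc, ih]
      by_cases hkj : k = j
      · subst hkj
        rw [pvSet_getElem?_self]
        by_cases hm : k ∈ js <;> simp [hm, hc, Option.map_map, Function.comp_def]
      · simp [List.getElem?_set_ne (by omega : j ≠ k), hkj]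
    · rw [List.foldl_cons, if_neg hc, ih]
      by_cases hkj : k = j
      · subst hkj; simp [hc]
      · simp [hkj]

-- the per-row equality, under the length precondition
lemma pvRow (n i : Nat) (v : Int) (row : List Int)
    (hi_lt : i < n) (hlen : min (i + 4) n ≤ row.length) :
    (List.range n).foldl
        (fun (r : List Int) (j : Nat) =>
          if ((i : Int) - (j : Int)).natAbs < 4 then r.set j v else r) row
      = row.take (i - 3) ++ List.replicate (min n (i + 4) - (i - 3)) v ++ row.drop (min n (i + 4)) := by
  apply List.ext_getElem?
  intro k
  rw [pvFoldSet_getElem? (fun j => ((i : Int) - (j : Int)).natAbs < 4) v (List.range n) row k]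
  have hband : (k ∈ List.range n ∧ ((i : Int) - (k : Int)).natAbs < 4)
      ↔ (i - 3 ≤ k ∧ k < min n (i + 4)) := by
    simp only [List.mem_range]
    omega
  have hhi : min n (i + 4) ≤ row.length := by omega
  have hTakeLen : (List.take (i - 3) row).length = i - 3 := by simp; omega
  have hTR : (List.take (i - 3) row ++ List.replicate (min n (i + 4) - (i - 3)) v).length
      = min n (i + 4) := by simp; omega
  by_cases h1 : k < i - 3
  · rw [if_neg (by rw [hband]; omega)]
    rw [List.getElem?_append_left (by rw [hTR]; omega),
        List.getElem?_append_left (by rw [hTakeLen]; omega)]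
    simp [List.getElem?_take, h1]
  · by_cases h2 : k < min n (i + 4)
    · rw [if_pos (by rw [hband]; omega)]
      have hkrow : k < row.length := by omega
      rw [List.getElem?_append_left (by rw [hTR]; omega),
          List.getElem?_append_right (by rw [hTakeLen]; omega), hTakeLen,
          List.getElem?_replicate, if_pos (by omega)]
      simp [List.getElem?_eq_getElem hkrow]
    · rw [if_neg (by rw [hband]; omega)]
      rw [List.getElem?_append_right (by rw [hTR]; omega), hTR, List.getElem?_drop]
      congr 1
      omega

lemma pvA_eq (matrix : List (List Int)) (v : Int) :
    mask_diagonal matrix v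
      = pvApplyIdx (fun i row =>
          (List.range matrix.length).foldl
            (fun (r : List Int) (j : Nat) =>
              if ((i : Int) - (j : Int)).natAbs < 4 then r.set j v else r) row)
          0 matrix := by
  unfold mask_diagonal
  have hstep : (fun (m : List (List Int)) (i : Nat) =>
      (List.range matrix.length).foldl
        (fun (m : List (List Int)) (j : Nat) =>
          if ((i : Int) - (j : Int)).natAbs < 4 then m.set i ((m.getD i []).set j v) else m) m)
      = fun (m : List (List Int)) (i : Nat) => m.set i ((List.range matrix.length).foldl
          (fun (r : List Int) (j : Nat) =>
            if ((i : Int) - (j : Int)).natAbs < 4 then r.set j v else r) (m.getD i [])) := by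
    funext m i
    exact pvInnerShift i (fun j => ((i : Int) - (j : Int)).natAbs < 4) v _ m
  simp only [hstep]
  have := pvOuterFold (fun i row =>
      (List.range matrix.length).foldl
        (fun (r : List Int) (j : Nat) =>
          if ((i : Int) - (j : Int)).natAbs < 4 then r.set j v else r) row)
      matrix []
  simpa [List.range_eq_range'] using this

lemma pvB_eq (matrix : List (List Int)) (v : Int) :
    mask_diagonal_alt matrix v
      = pvApplyIdx (fun i row =>
          row.take (i - 3) ++ List.replicate (min matrix.length (i + 4) - (i - 3)) v
            ++ row.drop (min matrix.length (i + 4))) 0 matrix := by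
  unfold mask_diagonal_alt
  have := pvOuterFold (fun i row =>
      row.take (i - 3) ++ List.replicate (min matrix.length (i + 4) - (i - 3)) v
        ++ row.drop (min matrix.length (i + 4))) matrix []
  simpa [List.range_eq_range'] using this

-- ===== VERDICT (by name: the statement is the Claim_ definition above) =====
theorem mask_diagonal_spec : Claim_equal_mask_diagonal := by
  intro matrix mask_value _hDom hPre
  unfold Spec_mask_diagonal
  rw [pvA_eq, pvB_eq]
  apply pvApplyIdx_congr
  intro k hk
  simp only [Nat.zero_add]
  exact pvRow matrix.length k mask_value (matrix.getD k []) hk (hPre k hk)
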